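-- pv_equiv track=rewrite | github.com/EgorDudyrev/caspailleur | caspailleur/definitions.py | is_pseudo_intent
-- ===== SOURCE A (Python) =====
-- from typing import List, FrozenSet, Iterable
-- from itertools import chain, combinations
--
-- def powerset(iterable) -> Iterable[FrozenSet[int]]:
--     """powerset({1,2,3}) --> () (1,) (2,) (3,) (1,2) (1,3) (2,3) (1,2,3)"""
--     s = list(iterable)
--     return map(frozenset, chain.from_iterable(combinations(s, r) for r in range(len(s)+1)))
--
-- def is_subset_of(A: FrozenSet[int], B: FrozenSet[int]):
--     """Test whether `A` is a subset of `B`"""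
--     return A & B == A
--
-- def is_psubset_of(A: FrozenSet[int], B: FrozenSet[int]):
--     """Test whether `A` is a proper subset of `B`"""
--     return (A & B == A) and A != B
--
-- def closure(B: FrozenSet[int], crosses_per_columns: List[FrozenSet[int]]) -> FrozenSet[int]:
--     n_rows = max(max(col) for col in crosses_per_columns)
--
--     extent = frozenset(range(n_rows))
--     for m in B:
--         extent = extent & crosses_per_columns[m]
--
--     intent = frozenset({m for m, col in enumerate(crosses_per_columns) if m in B or is_subset_of(extent, col)})
--     return intent
--
-- def is_closed(B: FrozenSet[int], crosses_per_columns: List[FrozenSet[int]]) -> bool: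
--     return B == closure(B, crosses_per_columns)
--
-- def is_pseudo_intent(
--         P: FrozenSet[int],
--         crosses_per_columns: List[FrozenSet[int]],
--         sub_pseudo_intents: List[FrozenSet[int]] = None,
--         is_closed_: bool = None,
-- ) -> bool:
--     """
--     An attribute set $P$ is a __pseudo-intent__ iff
--     * $P \neq P''$
--     * $Q'' \subset P$ for every pseudo-intent $Q \subset P$
--     """
--     if is_closed_ is None:
--         is_closed_ = is_closed(P, crosses_per_columns)
--
--     if is_closed_:
--         return False
--
--     if sub_pseudo_intents is None:
--         sub_pseudo_intents = []
--         for D in powerset(P):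
--             if frozenset(D) == P:
--                 continue
--             if is_pseudo_intent(D, crosses_per_columns, sub_pseudo_intents):
--                 sub_pseudo_intents.append(D)
--
--     return all(is_psubset_of(closure(Q, crosses_per_columns), P) for Q in sub_pseudo_intents if is_psubset_of(Q, P))
-- ===== SOURCE B (Python) =====
-- from typing import List, FrozenSet
-- from itertools import combinations
--
--
-- def _closure(B, crosses_per_columns):
--     n_rows = max(max(col) for col in crosses_per_columns)
--     extent = frozenset(range(n_rows))
--     for m in B:
--         extent = extent & crosses_per_columns[m]
--     return frozenset({m for m, col in enumerate(crosses_per_columns)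
--                       if m in B or extent & col == extent})
--
--
-- def is_pseudo_intent(
--         P: FrozenSet[int],
--         crosses_per_columns: List[FrozenSet[int]],
--         sub_pseudo_intents: List[FrozenSet[int]] = None,
--         is_closed_: bool = None,
-- ) -> bool:
--     P = frozenset(P)
--     if is_closed_ is None:
--         is_closed_ = _closure(P, crosses_per_columns) == P
--     if is_closed_:
--         return False
--     if sub_pseudo_intents is not None:
--         return all(_closure(Q, crosses_per_columns) < P
--                    for Q in map(frozenset, sub_pseudo_intents) if frozenset(Q) < P)
--     # bottom-up over proper subsets by size, caching each closure next to its set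
--     pseudo = []  # pairs (Q, closure(Q)) for every pseudo-intent Q found so far
--     elems = list(P)
--     for r in range(len(elems)):
--         for comb in combinations(elems, r):
--             D = frozenset(comb)
--             cD = _closure(D, crosses_per_columns)
--             if cD == D:
--                 continue
--             if all(cQ < D for (Q, cQ) in pseudo if Q < D):
--                 pseudo.append((D, cD))
--     return all(cQ < P for (Q, cQ) in pseudo)
-- ===== Notes on version B (the rewrite author's own statement) =====
-- stated objective: alternative
-- what changed: Replaces A's recursive self-call with an iterative bottom-up scan of the proper subsets by size that caches each subset's closure next to it in (set, closure) pairs, judges each candidate with frozenset operators against the cached pairs, and drops A's D==P skip and the final proper-subset filter (both made redundant by enumerating only proper subsets).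
import Mathlib
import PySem

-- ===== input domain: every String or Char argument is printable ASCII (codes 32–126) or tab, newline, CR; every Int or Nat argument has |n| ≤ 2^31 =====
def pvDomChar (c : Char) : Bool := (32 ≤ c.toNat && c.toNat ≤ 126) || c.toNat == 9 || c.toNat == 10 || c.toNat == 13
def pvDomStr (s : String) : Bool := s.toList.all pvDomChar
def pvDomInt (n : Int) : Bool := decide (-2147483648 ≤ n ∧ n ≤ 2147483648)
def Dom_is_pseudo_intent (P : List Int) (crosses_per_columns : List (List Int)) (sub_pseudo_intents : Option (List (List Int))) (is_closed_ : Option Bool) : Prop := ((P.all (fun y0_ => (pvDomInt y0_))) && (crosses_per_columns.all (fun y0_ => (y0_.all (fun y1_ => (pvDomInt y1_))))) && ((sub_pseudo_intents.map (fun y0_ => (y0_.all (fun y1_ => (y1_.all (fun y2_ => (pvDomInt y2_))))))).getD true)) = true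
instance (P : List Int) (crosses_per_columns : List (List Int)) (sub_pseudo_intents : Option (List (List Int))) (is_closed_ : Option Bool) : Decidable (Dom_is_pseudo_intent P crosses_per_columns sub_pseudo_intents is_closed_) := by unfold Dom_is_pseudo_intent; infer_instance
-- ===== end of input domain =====

-- ===== PORT A =====
-- B matches A's return value; neither mutates its arguments. Objective of B: alternative decomposition
-- (iterative bottom-up scan of proper subsets with cached closures instead of A's recursive self-call).

-- set helpers (frozensets are lists of distinct elements; equality/∩ are set-wise)
def pySetEq (a b : List Int) : Bool := a.all (fun x => b.contains x) && b.all (fun x => a.contains x)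

def pyInter (a b : List Int) : List Int := a.filter (fun x => b.contains x)

def is_subset_of (A B : List Int) : Bool := pySetEq (pyInter A B) A

def is_psubset_of (A B : List Int) : Bool := pySetEq (pyInter A B) A && !(pySetEq A B)

-- closure(B, crosses_per_columns); `.getD`-defaults are only reached where the Python raises (outside Pre_)
def closureA (B : List Int) (cols : List (List Int)) : List Int :=
  let n_rows : Int := ((PySem.List.max? (cols.map (fun col => (PySem.List.max? col (fun x => x)).getD 0)) (fun x => x)).getD 0)
  let extent := B.foldl (fun e m => pyInter e ((PySem.List.pyGet? cols m).getD [])) (PySem.List.pyRange 0 n_rows 1)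
  ((PySem.List.enumerate cols 0).filter (fun p => B.contains p.1 || is_subset_of extent p.2)).map (fun p => p.1)

def is_closedA (B : List Int) (cols : List (List Int)) : Bool := pySetEq B (closureA B cols)

-- itertools.combinations (s distinct) in itertools order
def combinations : List Int → Nat → List (List Int)
  | _, 0 => [[]]
  | [], _ + 1 => []
  | x :: xs, r + 1 => (combinations xs r).map (fun c => x :: c) ++ combinations xs (r + 1)

def powersetA (s : List Int) : List (List Int) :=
  (List.range (s.length + 1)).flatMap (fun r => combinations s r)

-- the recursive call is_pseudo_intent(D, cols, acc): its third argument is never None, so the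
-- recursion is one level deep; this helper is that call's body (is_closed test, then the all(...))
def innerA (D : List Int) (cols : List (List Int)) (acc : List (List Int)) : Bool :=
  if is_closedA D cols then false
  else (acc.filter (fun Q => is_psubset_of Q D)).all (fun Q => is_psubset_of (closureA Q cols) D)

def subsA (P : List Int) (cols : List (List Int)) : List (List Int) :=
  (powersetA P).foldl
    (fun acc D => if pySetEq D P then acc
                  else if innerA D cols acc then acc ++ [D] else acc) []

def is_pseudo_intent (P : List Int) (crosses_per_columns : List (List Int)) (sub_pseudo_intents : Option (List (List Int))) (is_closed_ : Option Bool) : Bool :=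
  let isc : Bool := match is_closed_ with
    | none => is_closedA P crosses_per_columns
    | some b => b
  if isc then false
  else
    let subs : List (List Int) := match sub_pseudo_intents with
      | none => subsA P crosses_per_columns
      | some L => L
    (subs.filter (fun Q => is_psubset_of Q P)).all (fun Q => is_psubset_of (closureA Q crosses_per_columns) P)

-- ===== PORT B =====
-- B's `<` on frozensets (proper subset) and its _closure (same code as A's closure, with the
-- subset test `extent & col == extent` written inline)
def pSub (a b : List Int) : Bool := a.all (fun x => b.contains x) && !(b.all (fun x => a.contains x))

def closureB (B : List Int) (cols : List (List Int)) : List Int :=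
  let n_rows : Int := ((PySem.List.max? (cols.map (fun col => (PySem.List.max? col (fun x => x)).getD 0)) (fun x => x)).getD 0)
  let extent := B.foldl (fun e m => pyInter e ((PySem.List.pyGet? cols m).getD [])) (PySem.List.pyRange 0 n_rows 1)
  ((PySem.List.enumerate cols 0).filter (fun p => B.contains p.1 || pySetEq (pyInter extent p.2) extent)).map (fun p => p.1)

-- the two nested `for` loops: pseudo collects (Q, closure(Q)) pairs, sizes 0 .. |P|-1
def pseudoB (P : List Int) (cols : List (List Int)) : List (List Int × List Int) :=
  (List.range P.length).foldl
    (fun ps r => (combinations P r).foldl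
      (fun ps D =>
        let cD := closureB D cols
        if pySetEq cD D then ps
        else if (ps.filter (fun q => pSub q.1 D)).all (fun q => pSub q.2 D) then ps ++ [(D, cD)]
        else ps) ps) []

def is_pseudo_intent_alt (P : List Int) (crosses_per_columns : List (List Int)) (sub_pseudo_intents : Option (List (List Int))) (is_closed_ : Option Bool) : Bool :=
  let isc : Bool := match is_closed_ with
    | none => pySetEq (closureB P crosses_per_columns) P
    | some b => b
  if isc then false
  else
    match sub_pseudo_intents with
    | some L => (L.filter (fun Q => pSub Q P)).all (fun Q => pSub (closureB Q crosses_per_columns) P)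
    | none => (pseudoB P crosses_per_columns).all (fun q => pSub q.2 P)

-- ===== PRECONDITION & SPEC =====
-- Pre_ excludes exactly the inputs on which A raises (ValueError from max() on an empty column
-- list or an empty column, IndexError on an attribute that is not a valid column index — each
-- required only in the branches where A actually evaluates closure), plus, per the set-type
-- convention (FrozenSet → list of DISTINCT elements), non-canonical representations of P
-- (duplicated elements) in the one branch that enumerates P's subsets.
def Pre_is_pseudo_intent (P : List Int) (crosses_per_columns : List (List Int)) (sub_pseudo_intents : Option (List (List Int))) (is_closed_ : Option Bool) : Prop :=
  (sub_pseudo_intents = none → is_closed_ ≠ some true → P.Nodup) ∧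
  (is_closed_ = none →
    (crosses_per_columns ≠ [] ∧ (∀ c ∈ crosses_per_columns, c ≠ []) ∧
     (∀ m ∈ P, (-(crosses_per_columns.length : Int) ≤ m ∧ m < (crosses_per_columns.length : Int))))) ∧
  (is_closed_ = some false → sub_pseudo_intents = none →
    ((P ≠ [] →
       (crosses_per_columns ≠ [] ∧ (∀ c ∈ crosses_per_columns, c ≠ []))) ∧
     (1 < P.length → ∀ m ∈ P, (-(crosses_per_columns.length : Int) ≤ m ∧ m < (crosses_per_columns.length : Int))))) ∧
  (is_closed_ = some false →
    (∃ Q ∈ sub_pseudo_intents.getD [], (∀ x ∈ Q, x ∈ P) ∧ ¬ (∀ x ∈ P, x ∈ Q)) →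
    (crosses_per_columns ≠ [] ∧ (∀ c ∈ crosses_per_columns, c ≠ []) ∧
     (∀ Q ∈ sub_pseudo_intents.getD [], ((∀ x ∈ Q, x ∈ P) ∧ ¬ (∀ x ∈ P, x ∈ Q)) →
        ∀ m ∈ Q, (-(crosses_per_columns.length : Int) ≤ m ∧ m < (crosses_per_columns.length : Int)))))

set_option maxHeartbeats 1000000 in
instance (P : List Int) (crosses_per_columns : List (List Int)) (sub_pseudo_intents : Option (List (List Int))) (is_closed_ : Option Bool) : Decidable (Pre_is_pseudo_intent P crosses_per_columns sub_pseudo_intents is_closed_) := by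
  unfold Pre_is_pseudo_intent
  refine @instDecidableAnd _ _ ?_ (@instDecidableAnd _ _ ?_ (@instDecidableAnd _ _ ?_ ?_)) <;> infer_instance

def pvWitness_is_pseudo_intent : List Int × List (List Int) × Option (List (List Int)) × Option Bool :=
  ([0, 2], [[0, 1], [1, 2], [0, 2]], none, none)

def Spec_is_pseudo_intent (P : List Int) (crosses_per_columns : List (List Int)) (sub_pseudo_intents : Option (List (List Int))) (is_closed_ : Option Bool) (out : Bool) : Prop := out = is_pseudo_intent_alt P crosses_per_columns sub_pseudo_intents is_closed_
instance (P : List Int) (crosses_per_columns : List (List Int)) (sub_pseudo_intents : Option (List (List Int))) (is_closed_ : Option Bool) (out : Bool) : Decidable (Spec_is_pseudo_intent P crosses_per_columns sub_pseudo_intents is_closed_ out) := by unfold Spec_is_pseudo_intent; infer_instance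

-- ===== CLAIM (what is proved, stated in full; the proofs are below) =====
def Claim_equal_is_pseudo_intent : Prop := ∀ (P : List Int) (crosses_per_columns : List (List Int)) (sub_pseudo_intents : Option (List (List Int))) (is_closed_ : Option Bool), Dom_is_pseudo_intent P crosses_per_columns sub_pseudo_intents is_closed_ → Pre_is_pseudo_intent P crosses_per_columns sub_pseudo_intents is_closed_ → Spec_is_pseudo_intent P crosses_per_columns sub_pseudo_intents is_closed_ (is_pseudo_intent P crosses_per_columns sub_pseudo_intents is_closed_)

-- ===== LEMMAS AND PROOFS =====

theorem pvWitness_ok : Dom_is_pseudo_intent pvWitness_is_pseudo_intent.1 pvWitness_is_pseudo_intent.2.1 pvWitness_is_pseudo_intent.2.2.1 pvWitness_is_pseudo_intent.2.2.2 ∧ Pre_is_pseudo_intent pvWitness_is_pseudo_intent.1 pvWitness_is_pseudo_intent.2.1 pvWitness_is_pseudo_intent.2.2.1 pvWitness_is_pseudo_intent.2.2.2 := by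
  decide

theorem closureB_eq (B : List Int) (cols : List (List Int)) : closureB B cols = closureA B cols := rfl

theorem pySetEq_comm (a b : List Int) : pySetEq a b = pySetEq b a := by
  unfold pySetEq; exact Bool.and_comm _ _

theorem pySetEq_refl (a : List Int) : pySetEq a a = true := by
  simp [pySetEq, List.all_eq_true]

theorem subset_of_all (a b : List Int) (h : a.all (fun x => b.contains x) = true) : a ⊆ b := by
  intro x hx
  have := (List.all_eq_true.mp h) x hx
  simpa using this

theorem all_of_subset (a b : List Int) (h : a ⊆ b) : a.all (fun x => b.contains x) = true := by
  rw [List.all_eq_true]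
  intro x hx
  simpa using h hx

theorem inter_setEq (a b : List Int) : pySetEq (pyInter a b) a = a.all (fun x => b.contains x) := by
  rw [Bool.eq_iff_iff]
  unfold pySetEq pyInter
  simp only [Bool.and_eq_true, List.all_eq_true, List.mem_filter, List.contains_eq_mem,
    decide_eq_true_eq, and_imp]
  constructor
  · rintro ⟨-, h2⟩ x hx; exact (h2 x hx).2
  · intro h; exact ⟨fun x hx _ => hx, fun x hx => ⟨hx, h x hx⟩⟩

theorem psub_eq (a b : List Int) : is_psubset_of a b = pSub a b := by
  unfold is_psubset_of pSub
  rw [inter_setEq]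
  unfold pySetEq
  cases h1 : a.all (fun x => b.contains x) <;> cases h2 : b.all (fun x => a.contains x) <;> rfl

theorem combinations_spec (l : List Int) (r : Nat) (D : List Int) (h : D ∈ combinations l r) :
    D.Sublist l ∧ D.length = r := by
  induction l generalizing r D with
  | nil =>
    cases r with
    | zero => simp [combinations] at h; subst h; simp
    | succ r => simp [combinations] at h
  | cons x xs ih =>
    cases r with
    | zero => simp [combinations] at h; subst h; simp
    | succ r =>
      simp only [combinations, List.mem_append, List.mem_map] at h
      rcases h with ⟨c, hc, rfl⟩ | h
      · obtain ⟨h1, h2⟩ := ih r c hc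
        exact ⟨List.Sublist.cons₂ x h1, by simp [h2]⟩
      · obtain ⟨h1, h2⟩ := ih (r + 1) D h
        exact ⟨List.Sublist.cons x h1, h2⟩

theorem combinations_gt (l : List Int) (r : Nat) (h : l.length < r) : combinations l r = [] := by
  induction l generalizing r with
  | nil =>
    cases r with
    | zero => omega
    | succ r => rfl
  | cons x xs ih =>
    cases r with
    | zero => simp at h
    | succ r =>
      simp only [combinations]
      rw [ih r (by simp at h; omega), ih (r + 1) (by simp at h; omega)]
      simp

theorem combinations_full (l : List Int) : combinations l l.length = [l] := by
  induction l with
  | nil => rfl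
  | cons x xs ih =>
    simp only [List.length_cons, combinations]
    rw [ih, combinations_gt xs (xs.length + 1) (by omega)]
    simp

theorem psub_of_proper (P D : List Int) (hN : P.Nodup) (r : Nat) (hr : r < P.length)
    (hD : D ∈ combinations P r) : pSub D P = true := by
  obtain ⟨hsub, hlen⟩ := combinations_spec P r D hD
  unfold pSub
  rw [Bool.and_eq_true]
  refine ⟨all_of_subset _ _ hsub.subset, ?_⟩
  cases h : P.all (fun x => D.contains x) with
  | false => rfl
  | true =>
    exfalso
    have := (List.subperm_of_subset hN (subset_of_all P D h)).length_le
    omega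

theorem setEq_false_of_proper (P D : List Int) (hN : P.Nodup) (r : Nat) (hr : r < P.length)
    (hD : D ∈ combinations P r) : pySetEq D P = false := by
  have h := psub_of_proper P D hN r hr hD
  unfold pSub at h
  rw [Bool.and_eq_true] at h
  unfold pySetEq
  rw [h.1]
  cases h2 : P.all (fun x => D.contains x) with
  | false => rfl
  | true => rw [h2] at h; simp at h

-- the combinations of sizes 0 .. |P|-1, in A's (= B's) enumeration order
def properCombos (P : List Int) : List (List Int) :=
  (List.range P.length).flatMap (fun r => combinations P r)

theorem mem_properCombos (P D : List Int) (hN : P.Nodup) (hD : D ∈ properCombos P) :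
    pSub D P = true ∧ pySetEq D P = false := by
  simp only [properCombos, List.mem_flatMap, List.mem_range] at hD
  obtain ⟨r, hr, hDr⟩ := hD
  exact ⟨psub_of_proper P D hN r hr hDr, setEq_false_of_proper P D hN r hr hDr⟩

theorem powersetA_split (P : List Int) : powersetA P = properCombos P ++ [P] := by
  unfold powersetA properCombos
  rw [List.range_succ, List.flatMap_append]
  simp [combinations_full]

def phi (cols : List (List Int)) (Q : List Int) : List Int × List Int := (Q, closureA Q cols)

theorem subsA_eq_proper (P : List Int) (cols : List (List Int)) :
    subsA P cols
      = (properCombos P).foldl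
          (fun acc D => if pySetEq D P then acc
                        else if innerA D cols acc then acc ++ [D] else acc) [] := by
  unfold subsA
  rw [powersetA_split, List.foldl_append]
  simp [pySetEq_refl]

-- one step of B's inner loop, on a state that is the phi-image of A's accumulator
theorem step_eq (cols : List (List Int)) (D : List Int) (acc : List (List Int)) :
    (let cD := closureB D cols
     if pySetEq cD D then acc.map (phi cols)
     else if ((acc.map (phi cols)).filter (fun q => pSub q.1 D)).all (fun q => pSub q.2 D) then
       acc.map (phi cols) ++ [(D, cD)]
     else acc.map (phi cols))
    = (if innerA D cols acc then acc ++ [D] else acc).map (phi cols) := by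
  rw [closureB_eq]
  unfold innerA is_closedA
  simp only [pySetEq_comm (closureA D cols) D]
  cases pySetEq D (closureA D cols) with
  | true => simp
  | false =>
    simp only [Bool.false_eq_true, if_false]
    have hfilter : ((acc.map (phi cols)).filter (fun q => pSub q.1 D))
        = (acc.filter (fun Q => pSub Q D)).map (phi cols) := by
      rw [List.filter_map]; rfl
    rw [hfilter, List.all_map]
    have hall : (acc.filter (fun Q => pSub Q D)).all ((fun q => pSub q.2 D) ∘ phi cols)
        = (acc.filter (fun Q => is_psubset_of Q D)).all (fun Q => is_psubset_of (closureA Q cols) D) := by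
      simp only [Function.comp_def, phi, psub_eq]
    rw [hall]
    cases (acc.filter (fun Q => is_psubset_of Q D)).all (fun Q => is_psubset_of (closureA Q cols) D) with
    | true => simp [phi]
    | false => simp

-- core invariant: over combos never set-equal to P, B's paired fold is the phi-image of A's fold
theorem fold_rel (cols : List (List Int)) (P : List Int) (combos : List (List Int))
    (hne : ∀ D ∈ combos, pySetEq D P = false) (acc : List (List Int)) :
    combos.foldl
      (fun ps D =>
        let cD := closureB D cols
        if pySetEq cD D then ps
        else if (ps.filter (fun q => pSub q.1 D)).all (fun q => pSub q.2 D) then ps ++ [(D, cD)]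
        else ps) (acc.map (phi cols))
    = (combos.foldl
        (fun acc D => if pySetEq D P then acc
                      else if innerA D cols acc then acc ++ [D] else acc) acc).map (phi cols) := by
  induction combos generalizing acc with
  | nil => rfl
  | cons D rest ih =>
    have hD : pySetEq D P = false := hne D (List.mem_cons_self ..)
    have hrest : ∀ E ∈ rest, pySetEq E P = false := fun E hE => hne E (List.mem_cons_of_mem _ hE)
    simp only [List.foldl_cons, hD, Bool.false_eq_true, if_false]
    rw [step_eq cols D acc]
    exact ih hrest _

theorem foldA_mem (cols : List (List Int)) (P : List Int) (combos : List (List Int))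
    (acc : List (List Int)) (Q : List Int)
    (hQ : Q ∈ combos.foldl
        (fun acc D => if pySetEq D P then acc
                      else if innerA D cols acc then acc ++ [D] else acc) acc) :
    Q ∈ acc ∨ Q ∈ combos := by
  induction combos generalizing acc with
  | nil => exact Or.inl hQ
  | cons D rest ih =>
    simp only [List.foldl_cons] at hQ
    rcases ih _ hQ with h | h
    · split_ifs at h with h1 h2
      · exact Or.inl h
      · rcases List.mem_append.mp h with h | h
        · exact Or.inl h
        · simp only [List.mem_singleton] at h; subst h
          exact Or.inr (List.mem_cons_self ..)
      · exact Or.inl h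
    · exact Or.inr (List.mem_cons_of_mem _ h)

-- B's nested loops compute A's list of sub-pseudo-intents, paired with their closures
theorem pseudoB_eq (P : List Int) (cols : List (List Int)) (hN : P.Nodup) :
    pseudoB P cols = (subsA P cols).map (phi cols) := by
  unfold pseudoB
  rw [subsA_eq_proper]
  have h := fold_rel cols P (properCombos P)
    (fun D hD => (mem_properCombos P D hN hD).2) []
  simp only [List.map_nil] at h
  rw [← h]
  unfold properCombos
  rw [List.foldl_flatMap]

theorem subsA_psub (P : List Int) (cols : List (List Int)) (hN : P.Nodup)
    (Q : List Int) (hQ : Q ∈ subsA P cols) : pSub Q P = true := by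
  rw [subsA_eq_proper] at hQ
  rcases foldA_mem cols P (properCombos P) [] Q hQ with h | h
  · simp at h
  · exact (mem_properCombos P Q hN h).1

theorem filter_all_eq (P : List Int) (cols : List (List Int)) (L : List (List Int)) :
    (L.filter (fun Q => is_psubset_of Q P)).all (fun Q => is_psubset_of (closureA Q cols) P)
    = (L.filter (fun Q => pSub Q P)).all (fun Q => pSub (closureB Q cols) P) := by
  simp only [psub_eq, closureB_eq]

theorem main_none_branch (P : List Int) (cols : List (List Int)) (hN : P.Nodup) :
    ((subsA P cols).filter (fun Q => is_psubset_of Q P)).all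
        (fun Q => is_psubset_of (closureA Q cols) P)
    = (pseudoB P cols).all (fun q => pSub q.2 P) := by
  rw [pseudoB_eq P cols hN, List.all_map]
  have hfilter : (subsA P cols).filter (fun Q => is_psubset_of Q P) = subsA P cols := by
    rw [List.filter_eq_self]
    intro Q hQ
    rw [psub_eq]
    exact subsA_psub P cols hN Q hQ
  rw [hfilter]
  simp [Function.comp_def, phi, psub_eq]

-- ===== VERDICT (by name: the statement is the Claim_ definition above) =====
theorem is_pseudo_intent_spec : Claim_equal_is_pseudo_intent := by
  intro P cols subs isc _ hpre
  unfold Spec_is_pseudo_intent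
  cases isc with
  | some b =>
    cases b with
    | true => rfl
    | false =>
      cases subs with
      | some L =>
        simp only [is_pseudo_intent, is_pseudo_intent_alt, Bool.false_eq_true, if_false]
        exact filter_all_eq P cols L
      | none =>
        simp only [is_pseudo_intent, is_pseudo_intent_alt, Bool.false_eq_true, if_false]
        exact main_none_branch P cols (hpre.1 rfl (by simp))
  | none =>
    simp only [is_pseudo_intent, is_pseudo_intent_alt]
    rw [closureB_eq, pySetEq_comm (closureA P cols) P]
    show (if is_closedA P cols then false else _)
        = (if pySetEq P (closureA P cols) then false else _)
    unfold is_closedA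
    cases pySetEq P (closureA P cols) with
    | true => simp
    | false =>
      simp only [Bool.false_eq_true, if_false]
      cases subs with
      | some L => exact filter_all_eq P cols L
      | none => exact main_none_branch P cols (hpre.1 rfl (by simp))
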